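-- pv_equiv track=rewrite | github.com/rodchristiansen/munkiadmin | MunkiAdmin/Scripts/yaml_bridge.py | sort_pkginfo_keys
-- ===== SOURCE A (Python) =====
-- PRIORITY_KEYS = ['name', 'display_name', 'version']
--
-- LAST_KEYS = ['_metadata']
--
-- def sort_pkginfo_keys(keys):
--     """Sort pkginfo dictionary keys with custom ordering.
--
--     - name, display_name, version appear first (in that order)
--     - _metadata appears last
--     - All other keys appear alphabetically in between
--     """
--     first_keys = []
--     middle_keys = []
--     end_keys = []
--
--     for key in keys:
--         if key in PRIORITY_KEYS:
--             first_keys.append(key)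
--         elif key in LAST_KEYS:
--             end_keys.append(key)
--         else:
--             middle_keys.append(key)
--
--     # Sort first keys by their position in PRIORITY_KEYS
--     first_keys.sort(key=lambda k: PRIORITY_KEYS.index(k) if k in PRIORITY_KEYS else 999)
--
--     # Sort middle keys alphabetically
--     middle_keys.sort()
--
--     # Sort end keys alphabetically
--     end_keys.sort()
--
--     return first_keys + middle_keys + end_keys
-- ===== SOURCE B (Python) =====
-- PRIORITY_KEYS = ['name', 'display_name', 'version']
--
-- LAST_KEYS = ['_metadata']
--
--
-- def sort_pkginfo_keys(keys):
--     """Sort pkginfo dictionary keys with custom ordering.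
--
--     One stable sort over a composite string rank: priority keys rank as
--     '0' followed by their position, trailing keys as '2' + key, and
--     everything else as '1' + key (i.e. alphabetically in the middle).
--     """
--     def rank(key):
--         if key in PRIORITY_KEYS:
--             return '0' + str(PRIORITY_KEYS.index(key))
--         if key in LAST_KEYS:
--             return '2' + key
--         return '1' + key
--
--     return sorted(keys, key=rank)
-- ===== Notes on version B (the rewrite author's own statement) =====
-- stated objective: idiomatic
-- what changed: Replaces the three-bucket partition plus three separate sorts and concatenation with a single stable sorted() call over a composite rank key ('0'+position for priority keys, '1'+key for middle, '2'+key for last).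
import Mathlib
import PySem

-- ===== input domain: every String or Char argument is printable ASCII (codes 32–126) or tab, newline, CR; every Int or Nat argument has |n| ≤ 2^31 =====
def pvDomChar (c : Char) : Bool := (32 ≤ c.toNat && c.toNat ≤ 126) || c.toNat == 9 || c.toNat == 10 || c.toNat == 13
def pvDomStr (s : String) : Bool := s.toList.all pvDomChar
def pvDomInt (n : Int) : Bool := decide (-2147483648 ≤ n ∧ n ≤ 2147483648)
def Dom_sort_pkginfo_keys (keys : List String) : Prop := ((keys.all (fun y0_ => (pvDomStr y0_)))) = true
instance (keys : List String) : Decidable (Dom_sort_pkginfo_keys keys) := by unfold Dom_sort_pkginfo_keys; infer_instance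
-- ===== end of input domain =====

-- B replaces A's three-bucket partition + three sorts + concatenation by ONE stable sort
-- with a composite string rank ('0'+position / '1'+key / '2'+key); objective: idiomatic.

-- ===== PORT A =====
def pvPriorityKeys : List String := ["name", "display_name", "version"]
def pvLastKeys : List String := ["_metadata"]

-- key=lambda k: PRIORITY_KEYS.index(k) if k in PRIORITY_KEYS else 999
-- (.getD 999 is unreachable under the guard: index? is some for a contained element)
def pvKeyA (k : String) : Int :=
  if pvPriorityKeys.contains k then (((PySem.List.index? pvPriorityKeys k).getD 999 : Nat) : Int)
  else 999

def sort_pkginfo_keys (keys : List String) : List String :=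
  let buckets := keys.foldl
    (fun (acc : List String × List String × List String) key =>
      if pvPriorityKeys.contains key then (acc.1 ++ [key], acc.2.1, acc.2.2)
      else if pvLastKeys.contains key then (acc.1, acc.2.1, acc.2.2 ++ [key])
      else (acc.1, acc.2.1 ++ [key], acc.2.2))
    ([], [], [])
  let firstKeys := PySem.List.sorted buckets.1 pvKeyA false
  let middleKeys := PySem.List.sorted buckets.2.1 (fun k => k) false
  let endKeys := PySem.List.sorted buckets.2.2 (fun k => k) false
  firstKeys ++ middleKeys ++ endKeys

-- ===== PORT B =====
-- rank(key) of Source B ('.getD 0' is unreachable under the guard: index? is some for a contained element)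
def pvRank (key : String) : String :=
  if pvPriorityKeys.contains key then
    "0" ++ PySem.Int.toStr (((PySem.List.index? pvPriorityKeys key).getD 0 : Nat) : Int)
  else if pvLastKeys.contains key then "2" ++ key
  else "1" ++ key

def sort_pkginfo_keys_alt (keys : List String) : List String :=
  PySem.List.sorted keys pvRank false

-- ===== PRECONDITION & SPEC =====
def Spec_sort_pkginfo_keys (keys : List String) (out : List String) : Prop := out = sort_pkginfo_keys_alt keys
instance (keys : List String) (out : List String) : Decidable (Spec_sort_pkginfo_keys keys out) := by unfold Spec_sort_pkginfo_keys; infer_instance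

-- ===== CLAIM (what is proved, stated in full; the proofs are below) =====
def Claim_equal_sort_pkginfo_keys : Prop := ∀ (keys : List String), Dom_sort_pkginfo_keys keys → Spec_sort_pkginfo_keys keys (sort_pkginfo_keys keys)

-- ===== LEMMAS AND PROOFS =====

lemma pv_mem_PK {k : String} (h : k ∈ pvPriorityKeys) :
    k = "name" ∨ k = "display_name" ∨ k = "version" := by
  simpa [pvPriorityKeys] using h

lemma pv_mem_LK {k : String} (h : k ∈ pvLastKeys) : k = "_metadata" := by
  simpa [pvLastKeys] using h

-- toList of the rank in the two non-priority branches
lemma pv_rank_middle {k : String} (h1 : k ∉ pvPriorityKeys) (h2 : k ∉ pvLastKeys) :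
    (pvRank k).toList = '1' :: k.toList := by
  simp [pvRank, h1, h2]

lemma pv_rank_end {k : String} (h1 : k ∉ pvPriorityKeys) (h2 : k ∈ pvLastKeys) :
    (pvRank k).toList = '2' :: k.toList := by
  simp [pvRank, h1, h2]

-- the three-bucket foldl of A computes the three filters
lemma pv_fold (keys : List String) (a b c : List String) :
    keys.foldl
      (fun (acc : List String × List String × List String) key =>
        if pvPriorityKeys.contains key then (acc.1 ++ [key], acc.2.1, acc.2.2)
        else if pvLastKeys.contains key then (acc.1, acc.2.1, acc.2.2 ++ [key])
        else (acc.1, acc.2.1 ++ [key], acc.2.2))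
      (a, b, c)
    = (a ++ keys.filter (fun k => pvPriorityKeys.contains k),
       b ++ keys.filter (fun k => !pvPriorityKeys.contains k && !pvLastKeys.contains k),
       c ++ keys.filter (fun k => !pvPriorityKeys.contains k && pvLastKeys.contains k)) := by
  induction keys generalizing a b c with
  | nil => simp
  | cons k ks ih =>
    rw [List.foldl_cons]
    cases hp : pvPriorityKeys.contains k
    · cases hl : pvLastKeys.contains k
      · simp only [hp, hl, Bool.false_eq_true, if_false, List.filter_cons, Bool.not_false,
          Bool.and_true, if_true]
        rw [ih]; simp
      · simp only [hp, hl, Bool.false_eq_true, if_false, if_true, List.filter_cons,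
          Bool.not_false, Bool.true_and]
        rw [ih]; simp
    · simp only [hp, if_true, List.filter_cons, Bool.not_true, Bool.false_and]
      rw [ih]; simp

-- the three filters are a permutation of the input
lemma pv_perm (keys : List String) :
    (keys.filter (fun k => pvPriorityKeys.contains k)
      ++ keys.filter (fun k => !pvPriorityKeys.contains k && !pvLastKeys.contains k)
      ++ keys.filter (fun k => !pvPriorityKeys.contains k && pvLastKeys.contains k)).Perm keys := by
  induction keys with
  | nil => simp
  | cons k ks ih =>
    cases hp : pvPriorityKeys.contains k
    · cases hl : pvLastKeys.contains k
      · -- middle bucket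
        simp only [List.filter_cons, hp, hl, Bool.false_eq_true, if_false, Bool.not_false,
          Bool.and_self, if_true]
        exact (List.Perm.append_right _ List.perm_middle).trans (ih.cons k)
      · -- end bucket
        simp only [List.filter_cons, hp, hl, Bool.false_eq_true, if_false, Bool.not_false,
          Bool.true_and, Bool.and_self, if_true]
        exact List.perm_middle.trans (ih.cons k)
    · -- priority bucket
      simp only [List.filter_cons, hp, if_true, Bool.not_true, Bool.false_and, Bool.false_eq_true,
        if_false, List.cons_append]
      exact ih.cons k

-- rank comparisons, bucket by bucket
lemma pv_le_PP {a b : String} (ha : a ∈ pvPriorityKeys) (hb : b ∈ pvPriorityKeys)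
    (h : pvKeyA a ≤ pvKeyA b) : pvRank a ≤ pvRank b := by
  rw [String.le_iff_toList_le]
  rcases pv_mem_PK ha with rfl | rfl | rfl <;> rcases pv_mem_PK hb with rfl | rfl | rfl <;>
    first
      | decide
      | exact absurd h (by decide)

lemma pv_le_MM {a b : String} (ha1 : a ∉ pvPriorityKeys) (ha2 : a ∉ pvLastKeys)
    (hb1 : b ∉ pvPriorityKeys) (hb2 : b ∉ pvLastKeys) (h : a ≤ b) : pvRank a ≤ pvRank b := by
  rw [String.le_iff_toList_le, pv_rank_middle ha1 ha2, pv_rank_middle hb1 hb2]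
  exact List.cons_le_cons _ (String.le_iff_toList_le.mp h)

lemma pv_le_EE {a b : String} (ha : a ∈ pvLastKeys) (hb : b ∈ pvLastKeys) :
    pvRank a ≤ pvRank b := by
  rw [pv_mem_LK ha, pv_mem_LK hb]

lemma pv_le_PM {a b : String} (ha : a ∈ pvPriorityKeys) (hb1 : b ∉ pvPriorityKeys)
    (hb2 : b ∉ pvLastKeys) : pvRank a ≤ pvRank b := by
  rw [String.le_iff_toList_le, pv_rank_middle hb1 hb2]
  apply le_of_lt
  rcases pv_mem_PK ha with rfl | rfl | rfl <;>
    exact List.cons_lt_cons_iff.mpr (Or.inl (by decide))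

lemma pv_le_PE {a b : String} (ha : a ∈ pvPriorityKeys) (hb1 : b ∉ pvPriorityKeys)
    (hb2 : b ∈ pvLastKeys) : pvRank a ≤ pvRank b := by
  rw [String.le_iff_toList_le, pv_rank_end hb1 hb2]
  apply le_of_lt
  rcases pv_mem_PK ha with rfl | rfl | rfl <;>
    exact List.cons_lt_cons_iff.mpr (Or.inl (by decide))

lemma pv_le_ME {a b : String} (ha1 : a ∉ pvPriorityKeys) (ha2 : a ∉ pvLastKeys)
    (hb1 : b ∉ pvPriorityKeys) (hb2 : b ∈ pvLastKeys) : pvRank a ≤ pvRank b := by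
  rw [String.le_iff_toList_le, pv_rank_middle ha1 ha2, pv_rank_end hb1 hb2]
  exact le_of_lt (List.cons_lt_cons_iff.mpr (Or.inl (by decide)))

-- pvRank is injective
lemma pv_rank_P {k : String} (h : k ∈ pvPriorityKeys) : ∃ d, (pvRank k).toList = ['0', d] := by
  rcases pv_mem_PK h with rfl | rfl | rfl
  · exact ⟨'0', by decide⟩
  · exact ⟨'1', by decide⟩
  · exact ⟨'2', by decide⟩

lemma pv_rank_inj : Function.Injective pvRank := by
  intro a b h
  have ht := congrArg String.toList h
  by_cases hpa : a ∈ pvPriorityKeys <;> by_cases hpb : b ∈ pvPriorityKeys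
  · rcases pv_mem_PK hpa with rfl | rfl | rfl <;> rcases pv_mem_PK hpb with rfl | rfl | rfl <;>
      first | rfl | exact absurd ht (by decide)
  · exfalso
    obtain ⟨d, hd⟩ := pv_rank_P hpa
    by_cases hlb : b ∈ pvLastKeys
    · rw [pv_rank_end hpb hlb, hd] at ht; simp at ht
    · rw [pv_rank_middle hpb hlb, hd] at ht; simp at ht
  · exfalso
    obtain ⟨d, hd⟩ := pv_rank_P hpb
    by_cases hla : a ∈ pvLastKeys
    · rw [pv_rank_end hpa hla, hd] at ht; simp at ht
    · rw [pv_rank_middle hpa hla, hd] at ht; simp at ht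
  · by_cases hla : a ∈ pvLastKeys <;> by_cases hlb : b ∈ pvLastKeys
    · rw [pv_mem_LK hla, pv_mem_LK hlb]
    · rw [pv_rank_end hpa hla, pv_rank_middle hpb hlb] at ht
      simp at ht
    · rw [pv_rank_middle hpa hla, pv_rank_end hpb hlb] at ht
      simp at ht
    · rw [pv_rank_middle hpa hla, pv_rank_middle hpb hlb] at ht
      exact String.toList_inj.mp (by simpa using ht)

-- bucket facts for members of the three sorted pieces
lemma pv_bucket_P {keys : List String} {x : String}
    (hx : x ∈ PySem.List.sorted (keys.filter (fun k => pvPriorityKeys.contains k)) pvKeyA false) :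
    x ∈ pvPriorityKeys := by
  have := List.mem_filter.mp ((PySem.List.mem_sorted _ _ _ _).mp hx)
  simpa using this.2

lemma pv_bucket_M {keys : List String} {x : String}
    (hx : x ∈ PySem.List.sorted (keys.filter (fun k => !pvPriorityKeys.contains k && !pvLastKeys.contains k)) (fun k => k) false) :
    x ∉ pvPriorityKeys ∧ x ∉ pvLastKeys := by
  have := List.mem_filter.mp ((PySem.List.mem_sorted _ _ _ _).mp hx)
  simpa using this.2

lemma pv_bucket_E {keys : List String} {x : String}
    (hx : x ∈ PySem.List.sorted (keys.filter (fun k => !pvPriorityKeys.contains k && pvLastKeys.contains k)) (fun k => k) false) :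
    x ∉ pvPriorityKeys ∧ x ∈ pvLastKeys := by
  have := List.mem_filter.mp ((PySem.List.mem_sorted _ _ _ _).mp hx)
  simpa using this.2

-- ===== VERDICT (by name: the statement is the Claim_ definition above) =====
theorem sort_pkginfo_keys_spec : Claim_equal_sort_pkginfo_keys := by
  intro keys _
  unfold Spec_sort_pkginfo_keys sort_pkginfo_keys sort_pkginfo_keys_alt
  rw [pv_fold]
  simp only [List.nil_append]
  apply PySem.List.eq_of_perm_of_pairwise_le_of_injective pvRank pv_rank_inj
  · -- permutation
    refine List.Perm.trans ?_ (PySem.List.sorted_perm keys pvRank false).symm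
    refine List.Perm.trans ?_ (pv_perm keys)
    exact ((PySem.List.sorted_perm _ pvKeyA false).append
      (PySem.List.sorted_perm _ (fun k => k) false)).append
      (PySem.List.sorted_perm _ (fun k => k) false)
  · -- pairwise on A's output
    rw [List.pairwise_append]
    refine ⟨?_, ?_, ?_⟩
    · rw [List.pairwise_append]
      refine ⟨?_, ?_, ?_⟩
      · exact (PySem.List.sorted_pairwise _ pvKeyA).imp_of_mem
          (fun ha hb h => pv_le_PP (pv_bucket_P ha) (pv_bucket_P hb) h)
      · exact (PySem.List.sorted_pairwise _ (fun k => k)).imp_of_mem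
          (fun ha hb h => by
            obtain ⟨ha1, ha2⟩ := pv_bucket_M ha
            obtain ⟨hb1, hb2⟩ := pv_bucket_M hb
            exact pv_le_MM ha1 ha2 hb1 hb2 h)
      · intro a ha b hb
        obtain ⟨hb1, hb2⟩ := pv_bucket_M hb
        exact pv_le_PM (pv_bucket_P ha) hb1 hb2
    · exact (PySem.List.sorted_pairwise _ (fun k => k)).imp_of_mem
        (fun ha hb _ => pv_le_EE (pv_bucket_E ha).2 (pv_bucket_E hb).2)
    · intro a ha b hb
      obtain ⟨hb1, hb2⟩ := pv_bucket_E hb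
      rcases List.mem_append.mp ha with ha | ha
      · exact pv_le_PE (pv_bucket_P ha) hb1 hb2
      · obtain ⟨ha1, ha2⟩ := pv_bucket_M ha
        exact pv_le_ME ha1 ha2 hb1 hb2
  · -- pairwise on B's output
    exact PySem.List.sorted_pairwise keys pvRank
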